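-- pv_equiv track=rewrite | github.com/BensGitHubAccount/plane-spacing | scratch_paper.py | create_state_space
-- ===== SOURCE A (Python) =====
-- num_bus_rows = 5
--
-- num_prem_rows = 5
--
-- num_econ_rows = 20
--
-- def create_state_space(orders):
--     state_space = [[[0]*2*num_bus_rows, [0]*2*num_bus_rows, [0]*2*num_bus_rows],
--                [[0]*2*num_prem_rows, [0]*2*num_prem_rows, [0]*2*num_prem_rows],
--                [[0]*2*num_econ_rows, [0]*2*num_econ_rows, [0]*2*num_econ_rows],]
--     for o in orders:
--         for i in range(len(state_space[o[0]][o[1]])):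
--             if state_space[o[0]][o[1]][i] == 0:
--                 state_space[o[0]][o[1]][i] = 1
--                 break
--     return state_space
-- ===== SOURCE B (Python) =====
-- num_bus_rows = 5
--
-- num_prem_rows = 5
--
-- num_econ_rows = 20
--
-- def create_state_space(orders):
--     counts = [[0, 0, 0], [0, 0, 0], [0, 0, 0]]
--     for o in orders:
--         counts[o[0]][o[1]] += 1
--     lengths = [2 * num_bus_rows, 2 * num_prem_rows, 2 * num_econ_rows]
--     return [[[1] * min(k, L) + [0] * (L - min(k, L)) for k in row]
--             for row, L in zip(counts, lengths)]
-- ===== Notes on version B (the rewrite author's own statement) =====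
-- stated objective: faster
-- what changed: Instead of scanning each seat row for its first zero on every order, B tallies orders into a 3x3 counts array in one pass and then renders every row directly as min(count, length) ones followed by zeros.
import Mathlib
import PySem

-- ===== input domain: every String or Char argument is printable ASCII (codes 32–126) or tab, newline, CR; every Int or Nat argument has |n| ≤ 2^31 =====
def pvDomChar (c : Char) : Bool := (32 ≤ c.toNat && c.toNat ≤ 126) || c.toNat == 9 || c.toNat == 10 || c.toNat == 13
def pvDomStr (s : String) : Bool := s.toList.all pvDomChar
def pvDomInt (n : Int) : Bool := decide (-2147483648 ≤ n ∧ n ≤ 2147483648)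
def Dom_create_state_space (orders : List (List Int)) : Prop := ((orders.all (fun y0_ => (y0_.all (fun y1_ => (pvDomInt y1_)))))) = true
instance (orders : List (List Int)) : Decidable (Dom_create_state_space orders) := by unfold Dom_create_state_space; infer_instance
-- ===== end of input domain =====

-- B replaces A's per-order first-zero row scan with a single counting pass plus a direct
-- ones-then-zeros rendering of each row (return value only; A mutates nothing observable).

-- ===== PORT A =====
-- inner loop 'for i in range(len(row)): if row[i]==0: row[i]=1; break' — sets the first 0 to 1
def fillRow : List Int → List Int
  | [] => []
  | x :: xs => if x = 0 then 1 :: xs else x :: fillRow xs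

def stepA (st : List (List (List Int))) (o : List Int) : List (List (List Int)) :=
  let c := PySem.List.pyGetD o 0 0
  let g := PySem.List.pyGetD o 1 0
  let cab := PySem.List.pyGetD st c []
  PySem.List.pySetD st c (PySem.List.pySetD cab g (fillRow (PySem.List.pyGetD cab g [])))

def create_state_space (orders : List (List Int)) : List (List (List Int)) :=
  orders.foldl stepA
    [[List.replicate (2 * 5) 0, List.replicate (2 * 5) 0, List.replicate (2 * 5) 0],
     [List.replicate (2 * 5) 0, List.replicate (2 * 5) 0, List.replicate (2 * 5) 0],
     [List.replicate (2 * 20) 0, List.replicate (2 * 20) 0, List.replicate (2 * 20) 0]]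

-- ===== PORT B =====
def stepB (counts : List (List Int)) (o : List Int) : List (List Int) :=
  let c := PySem.List.pyGetD o 0 0
  let g := PySem.List.pyGetD o 1 0
  let row := PySem.List.pyGetD counts c []
  PySem.List.pySetD counts c (PySem.List.pySetD row g (PySem.List.pyGetD row g 0 + 1))

-- '[1]*min(k,L) + [0]*(L-min(k,L))'
def renderRow (L : Int) (k : Int) : List Int :=
  List.replicate (min k L).toNat 1 ++ List.replicate (L - min k L).toNat 0

def render (counts : List (List Int)) : List (List (List Int)) :=
  (counts.zip [2 * 5, 2 * 5, 2 * 20]).map (fun p => p.1.map (renderRow p.2))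

def create_state_space_alt (orders : List (List Int)) : List (List (List Int)) :=
  render (orders.foldl stepB [[0, 0, 0], [0, 0, 0], [0, 0, 0]])

-- ===== PRECONDITION & SPEC =====
-- Pre_ excludes exactly the inputs on which A raises IndexError: an order with fewer than
-- two entries, or a cabin/group index outside Python's valid range -3..2 for the length-3 lists.
def Pre_create_state_space (orders : List (List Int)) : Prop :=
  ∀ o ∈ orders, 2 ≤ o.length ∧ -3 ≤ o.getD 0 0 ∧ o.getD 0 0 < 3 ∧ -3 ≤ o.getD 1 0 ∧ o.getD 1 0 < 3
instance (orders : List (List Int)) : Decidable (Pre_create_state_space orders) := by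
  unfold Pre_create_state_space; infer_instance

def pvWitness_create_state_space : List (List Int) := [[0, 1], [2, -1], [0, 1], [-3, 2]]

def Spec_create_state_space (orders : List (List Int)) (out : List (List (List Int))) : Prop := out = create_state_space_alt orders
instance (orders : List (List Int)) (out : List (List (List Int))) : Decidable (Spec_create_state_space orders out) := by unfold Spec_create_state_space; infer_instance

-- ===== CLAIM (what is proved, stated in full; the proofs are below) =====
def Claim_equal_create_state_space : Prop := ∀ (orders : List (List Int)), Dom_create_state_space orders → Pre_create_state_space orders → Spec_create_state_space orders (create_state_space orders)

-- ===== LEMMAS AND PROOFS =====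

def CountsOK (counts : List (List Int)) : Prop :=
  counts.length = 3 ∧ ∀ r ∈ counts, r.length = 3 ∧ ∀ k ∈ r, 0 ≤ k

lemma getD_one_cons (x y : Int) (t : List Int) : PySem.List.pyGetD (x :: y :: t) 1 0 = y := by
  simp [PySem.List.pyGetD, PySem.List.pyGet?, PySem.List.pyIdx?]

lemma stepA_cons (st : List (List (List Int))) (x y : Int) (t : List Int) :
    stepA st (x :: y :: t) =
      PySem.List.pySetD st x (PySem.List.pySetD (PySem.List.pyGetD st x []) y
        (fillRow (PySem.List.pyGetD (PySem.List.pyGetD st x []) y []))) := by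
  simp [stepA, getD_one_cons]

lemma stepB_cons (counts : List (List Int)) (x y : Int) (t : List Int) :
    stepB counts (x :: y :: t) =
      PySem.List.pySetD counts x (PySem.List.pySetD (PySem.List.pyGetD counts x []) y
        (PySem.List.pyGetD (PySem.List.pyGetD counts x []) y 0 + 1)) := by
  simp [stepB, getD_one_cons]

lemma fillRow_ones (n : Nat) : fillRow (List.replicate n 1) = List.replicate n 1 := by
  induction n with
  | zero => rfl
  | succ n ih => simp [List.replicate_succ, fillRow, ih]

lemma fillRow_ones_zeros (n m : Nat) :
    fillRow (List.replicate n 1 ++ List.replicate (m + 1) 0) =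
      List.replicate (n + 1) 1 ++ List.replicate m 0 := by
  induction n with
  | zero => simp [List.replicate_succ, fillRow]
  | succ n ih =>
    rw [List.replicate_succ, List.cons_append, fillRow]
    rw [if_neg (by norm_num), ih]
    simp [List.replicate_succ]

lemma fill_render (L k : Int) (hk : 0 ≤ k) :
    fillRow (renderRow L k) = renderRow L (k + 1) := by
  by_cases h : L ≤ k
  · have h1 : min k L = L := min_eq_right h
    have h2 : min (k + 1) L = L := min_eq_right (by omega)
    simp [renderRow, h1, h2, fillRow_ones]
  · have h1 : min k L = k := min_eq_left (by omega)
    have h2 : min (k + 1) L = k + 1 := min_eq_left (by omega)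
    have hm : (L - k).toNat = (L - (k + 1)).toNat + 1 := by omega
    have hn : (k + 1).toNat = k.toNat + 1 := by omega
    rw [renderRow, renderRow, h1, h2, hm, hn, fillRow_ones_zeros]

set_option maxHeartbeats 2000000 in
lemma step_render (a b c d e f g h i x y : Int) (t : List Int)
    (ha : 0 ≤ a) (hb : 0 ≤ b) (hc : 0 ≤ c) (hd : 0 ≤ d) (he : 0 ≤ e) (hf : 0 ≤ f)
    (hg : 0 ≤ g) (hh : 0 ≤ h) (hi : 0 ≤ i)
    (hx1 : -3 ≤ x) (hx2 : x < 3) (hy1 : -3 ≤ y) (hy2 : y < 3) :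
    stepA (render [[a, b, c], [d, e, f], [g, h, i]]) (x :: y :: t) =
      render (stepB [[a, b, c], [d, e, f], [g, h, i]] (x :: y :: t)) := by
  rw [stepA_cons, stepB_cons]
  interval_cases x <;> interval_cases y <;>
    simp [render, PySem.List.pyGetD, PySem.List.pyGet?,
      PySem.List.pySetD, PySem.List.pySet?, PySem.List.pyIdx?,
      fill_render,
      ha, hb, hc, hd, he, hf, hg, hh, hi]

set_option maxHeartbeats 2000000 in
lemma stepB_ok (a b c d e f g h i x y : Int) (t : List Int)
    (ha : 0 ≤ a) (hb : 0 ≤ b) (hc : 0 ≤ c) (hd : 0 ≤ d) (he : 0 ≤ e) (hf : 0 ≤ f)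
    (hg : 0 ≤ g) (hh : 0 ≤ h) (hi : 0 ≤ i)
    (hx1 : -3 ≤ x) (hx2 : x < 3) (hy1 : -3 ≤ y) (hy2 : y < 3) :
    CountsOK (stepB [[a, b, c], [d, e, f], [g, h, i]] (x :: y :: t)) := by
  rw [stepB_cons]
  interval_cases x <;> interval_cases y <;>
    · simp [CountsOK, PySem.List.pyGetD, PySem.List.pyGet?,
        PySem.List.pySetD, PySem.List.pySet?, PySem.List.pyIdx?]
      omega

lemma foldl_render (orders : List (List Int))
    (hpre : ∀ o ∈ orders, 2 ≤ o.length ∧ -3 ≤ o.getD 0 0 ∧ o.getD 0 0 < 3 ∧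
      -3 ≤ o.getD 1 0 ∧ o.getD 1 0 < 3) :
    ∀ counts : List (List Int), CountsOK counts →
      orders.foldl stepA (render counts) = render (orders.foldl stepB counts) := by
  induction orders with
  | nil => intro _ _; rfl
  | cons o os ih =>
    intro counts hC
    obtain ⟨hlen, hrows⟩ := hC
    obtain ⟨r0, r1, r2, rfl⟩ := List.length_eq_three.mp hlen
    obtain ⟨h0len, h0pos⟩ := hrows r0 (by simp)
    obtain ⟨h1len, h1pos⟩ := hrows r1 (by simp)
    obtain ⟨h2len, h2pos⟩ := hrows r2 (by simp)
    obtain ⟨a, b, c, rfl⟩ := List.length_eq_three.mp h0len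
    obtain ⟨d, e, f, rfl⟩ := List.length_eq_three.mp h1len
    obtain ⟨g, h, i, rfl⟩ := List.length_eq_three.mp h2len
    obtain ⟨hol, hx1, hx2, hy1, hy2⟩ := hpre o (List.mem_cons_self ..)
    match o, hol with
    | x :: y :: t, _ =>
      simp only [List.getD_cons_zero, List.getD_cons_succ] at hx1 hx2 hy1 hy2
      have ha := h0pos a (by simp); have hb := h0pos b (by simp); have hc := h0pos c (by simp)
      have hd := h1pos d (by simp); have he := h1pos e (by simp); have hf := h1pos f (by simp)
      have hg := h2pos g (by simp); have hh := h2pos h (by simp); have hi := h2pos i (by simp)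
      simp only [List.foldl_cons]
      rw [step_render a b c d e f g h i x y t ha hb hc hd he hf hg hh hi hx1 hx2 hy1 hy2]
      exact ih (fun o ho => hpre o (List.mem_cons_of_mem _ ho)) _
        (stepB_ok a b c d e f g h i x y t ha hb hc hd he hf hg hh hi hx1 hx2 hy1 hy2)

-- ===== VERDICT (by name: the statement is the Claim_ definition above) =====
theorem create_state_space_spec : Claim_equal_create_state_space := by
  intro orders _ hpre
  unfold Spec_create_state_space create_state_space create_state_space_alt
  have h0 : ([[List.replicate (2 * 5) (0 : Int), List.replicate (2 * 5) 0, List.replicate (2 * 5) 0],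
      [List.replicate (2 * 5) 0, List.replicate (2 * 5) 0, List.replicate (2 * 5) 0],
      [List.replicate (2 * 20) 0, List.replicate (2 * 20) 0, List.replicate (2 * 20) 0]]) =
      render [[0, 0, 0], [0, 0, 0], [0, 0, 0]] := by decide
  rw [h0]
  exact foldl_render orders hpre [[0, 0, 0], [0, 0, 0], [0, 0, 0]]
    ⟨rfl, by intro r hr; fin_cases hr <;> exact ⟨rfl, by intro k hk; fin_cases hk <;> norm_num⟩⟩
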